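-- pv_equiv track=rewrite | github.com/mthnhng/Database-and-Data-Structure | Travelling Saleman Problem.py | load_parcels
-- ===== SOURCE A (Python) =====
-- def load_parcels(path, unsorted_parcels):
--     bean_arr = []
--     bean_bag = []
--
--     for i in range(len(path)):
--         for j in range(len(unsorted_parcels)):
--             if path[i] == unsorted_parcels[j]:
--                 #add parcels which deliver to the same city into one bean bag
--                 bean_bag.append(unsorted_parcels[j])
--
--         #add the bean bag to the bean arrangement and re-empty the bean bag for next destination
--         bean_arr.append(bean_bag)
--         bean_bag = []
--
--     return bean_arr
-- ===== SOURCE B (Python) =====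
-- def load_parcels(path, unsorted_parcels):
--     # Count parcels per city once, then emit each bag directly by list repetition.
--     counts = {}
--     for p in unsorted_parcels:
--         counts[p] = counts.get(p, 0) + 1
--     return [[city] * counts.get(city, 0) for city in path]
-- ===== Notes on version B (the rewrite author's own statement) =====
-- stated objective: alternative
-- what changed: Replaces the nested scan of all parcels per path city by a single counting pass over the parcels plus per-city bag emission via list repetition; intended as faster (measured 2.76x at n=4096, unconfirmed at the largest size where the quadratic-size output dominates).
import Mathlib
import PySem

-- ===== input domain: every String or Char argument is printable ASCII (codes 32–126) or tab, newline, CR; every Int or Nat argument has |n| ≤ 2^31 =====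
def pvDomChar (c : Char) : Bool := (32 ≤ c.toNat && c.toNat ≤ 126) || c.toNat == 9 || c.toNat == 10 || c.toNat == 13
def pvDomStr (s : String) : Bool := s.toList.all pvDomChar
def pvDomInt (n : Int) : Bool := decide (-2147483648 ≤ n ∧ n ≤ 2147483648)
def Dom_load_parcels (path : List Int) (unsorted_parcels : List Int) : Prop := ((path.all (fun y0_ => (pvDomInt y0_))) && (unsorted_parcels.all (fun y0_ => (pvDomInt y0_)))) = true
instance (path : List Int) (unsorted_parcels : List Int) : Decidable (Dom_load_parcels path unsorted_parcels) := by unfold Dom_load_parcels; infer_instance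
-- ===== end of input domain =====

-- B counts parcels per city in one dict pass and emits each bag by repetition, replacing A's scan of all parcels per path city.

-- ===== PORT A =====
def load_parcels (path : List Int) (unsorted_parcels : List Int) : List (List Int) :=
  -- state = (bean_arr, bean_bag); inner loop appends matching parcels, outer loop stores the bag and resets it
  ((PySem.List.pyRange 0 (path.length : Int) 1).foldl
    (fun (st : List (List Int) × List Int) i =>
      (st.1 ++ [(PySem.List.pyRange 0 (unsorted_parcels.length : Int) 1).foldl
        (fun bean_bag j =>
          if PySem.List.pyGetD path i 0 = PySem.List.pyGetD unsorted_parcels j 0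
          then bean_bag ++ [PySem.List.pyGetD unsorted_parcels j 0] else bean_bag) st.2],
       ([] : List Int)))
    ([], [])).1

-- ===== PORT B =====
def load_parcels_alt (path : List Int) (unsorted_parcels : List Int) : List (List Int) :=
  let counts := unsorted_parcels.foldl
    (fun (d : PySem.Dict Int Int) p => d.insert p (d.getD p 0 + 1)) PySem.Dict.empty
  path.map (fun city => List.replicate (counts.getD city 0).toNat city)

-- ===== PRECONDITION & SPEC =====
def Spec_load_parcels (path : List Int) (unsorted_parcels : List Int) (out : List (List Int)) : Prop := out = load_parcels_alt path unsorted_parcels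
instance (path : List Int) (unsorted_parcels : List Int) (out : List (List Int)) : Decidable (Spec_load_parcels path unsorted_parcels out) := by unfold Spec_load_parcels; infer_instance

-- ===== CLAIM (what is proved, stated in full; the proofs are below) =====
def Claim_equal_load_parcels : Prop := ∀ (path : List Int) (unsorted_parcels : List Int), Dom_load_parcels path unsorted_parcels → Spec_load_parcels path unsorted_parcels (load_parcels path unsorted_parcels)

-- ===== LEMMAS AND PROOFS =====

-- A's outer loop: one finished bag (built from the empty bag the loop resets to) appended per city.
theorem outer_fold_eq_map (g : List Int → Int → List Int) (path : List Int)
    (acc : List (List Int)) :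
    ((path.foldl (fun (st : List (List Int) × List Int) c => (st.1 ++ [g st.2 c], ([] : List Int)))
      (acc, [])).1) = acc ++ path.map (fun c => g [] c) := by
  induction path generalizing acc with
  | nil => simp
  | cons c cs ih => simp [List.foldl_cons, ih]

theorem load_parcels_eq (path us : List Int) : load_parcels path us = load_parcels_alt path us := by
  have hinner : ∀ (c : Int) (bag : List Int),
      (PySem.List.pyRange 0 (us.length : Int) 1).foldl
        (fun bean_bag j => if c = PySem.List.pyGetD us j 0
          then bean_bag ++ [PySem.List.pyGetD us j 0] else bean_bag) bag
      = bag ++ List.replicate (us.count c) c := by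
    intro c bag
    rw [PySem.List.foldl_pyRange_zero_pyGetD' us 0
      (fun bean_bag x => if c = x then bean_bag ++ [x] else bean_bag) bag]
    rw [PySem.List.foldl_append_ite_eq_filter]
    congr 1
    simp only [@eq_comm _ c]
    exact List.filter_beq c
  unfold load_parcels load_parcels_alt
  simp only [hinner]
  rw [PySem.Dict.foldl_insert_getD_add_one_eq_counter]
  rw [PySem.List.foldl_pyRange_zero_pyGetD' path 0
    (fun (st : List (List Int) × List Int) c =>
      (st.1 ++ [st.2 ++ List.replicate (us.count c) c], ([] : List Int)))
    ([], [])]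
  rw [outer_fold_eq_map (fun bag c => bag ++ List.replicate (us.count c) c) path []]
  simp [PySem.Dict.getD_counter]

-- ===== VERDICT (by name: the statement is the Claim_ definition above) =====
theorem load_parcels_spec : Claim_equal_load_parcels := by
  intro path us _
  unfold Spec_load_parcels
  exact load_parcels_eq path us
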